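-- pv_equiv track=rewrite | github.com/nachokhan/data_capture | data_statistics.py | _generate_cumulative_sum
-- ===== SOURCE A (Python) =====
-- from typing import List
--
-- def _generate_cumulative_sum(data) -> List:
--     """
--     Generate two lists representing the cumulative sum of elements in the input data for calculations
--     of 'less than' and 'greater than' statistics.
--
--     The method iterates through the input list 'data' once. For each element at index 'n', it updates
--     the cumulative sum for elements 'less than' the current index and 'greater than' the corresponding
--     reverse index (values-n-1).
--
--     This approach allows for efficient calculation of cumulative sums in a single pass through the data,
--     ensuring linear complexity both in terms of time and space.
--
--     Args:
--         data: The input data, a list of integers.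
--
--     Returns:
--         tuple: A tuple containing two lists - the first list ('cum_less') contains the cumulative sum
--         of elements less than each index, and the second list ('cum_greater') contains the cumulative
--         sum of elements greater than each reverse index.
--     """
--     values = len(data)
--
--     cum_less = [0] * values
--     cum_greater = [0] * values
--
--     total_less = 0
--     total_greater = 0
--
--     for n in range(0, values):
--         cum_less[n] = total_less
--         cum_greater[values-n-1] = total_greater
--         total_less += data[n]
--         total_greater += data[values-n-1]
--
--     return cum_less, cum_greater
-- ===== SOURCE B (Python) =====
-- def _generate_cumulative_sum(data):
--     cum_less = [sum(data[:n]) for n in range(len(data))]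
--     cum_greater = [sum(data[n+1:]) for n in range(len(data))]
--     return cum_less, cum_greater
-- ===== Notes on version B (the rewrite author's own statement) =====
-- stated objective: simpler
-- what changed: Replaced A's single forward pass with two reverse-index accumulators by two independent list comprehensions that recompute each entry as sum(data[:n]) / sum(data[n+1:]) via slicing.
import Mathlib
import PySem

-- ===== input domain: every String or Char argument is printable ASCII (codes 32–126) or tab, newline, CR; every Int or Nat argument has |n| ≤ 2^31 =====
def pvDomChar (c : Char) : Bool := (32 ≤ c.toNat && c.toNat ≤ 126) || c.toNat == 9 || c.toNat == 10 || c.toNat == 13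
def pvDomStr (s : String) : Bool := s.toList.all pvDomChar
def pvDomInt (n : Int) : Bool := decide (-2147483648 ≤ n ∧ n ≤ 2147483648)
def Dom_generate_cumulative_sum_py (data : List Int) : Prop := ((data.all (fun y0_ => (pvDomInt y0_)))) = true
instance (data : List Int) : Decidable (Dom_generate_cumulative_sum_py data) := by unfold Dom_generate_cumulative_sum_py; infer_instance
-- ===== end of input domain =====

-- B replaces A's single forward pass (two running accumulators, reverse-index writes)
-- by two independent slice-and-sum comprehensions; objective: simpler.

-- ===== PORT A =====
-- literal port of A's single loop: preallocated arrays, two accumulators, reverse index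
def generate_cumulative_sum_py (data : List Int) : List Int × List Int :=
  let values : Int := data.length
  let r := (PySem.List.pyRange 0 values 1).foldl
    (fun (st : (List Int × List Int) × Int × Int) n =>
      let cl := PySem.List.pySetD st.1.1 n st.2.1
      let cg := PySem.List.pySetD st.1.2 (values - n - 1) st.2.2
      let tl := st.2.1 + PySem.List.pyGetD data n 0
      let tg := st.2.2 + PySem.List.pyGetD data (values - n - 1) 0
      ((cl, cg), tl, tg))
    ((List.replicate data.length 0, List.replicate data.length 0), 0, 0)
  (r.1.1, r.1.2)

-- ===== PORT B =====
-- literal port of B: two comprehensions, each entry recomputed from a slice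
def generate_cumulative_sum_py_alt (data : List Int) : List Int × List Int :=
  ((PySem.List.pyRange 0 data.length 1).map
      (fun n => (PySem.List.slice data none (some n)).sum),
   (PySem.List.pyRange 0 data.length 1).map
      (fun n => (PySem.List.slice data (some (n + 1)) none).sum))

-- ===== PRECONDITION & SPEC =====
def Spec_generate_cumulative_sum_py (data : List Int) (out : List Int × List Int) : Prop := out = generate_cumulative_sum_py_alt data
instance (data : List Int) (out : List Int × List Int) : Decidable (Spec_generate_cumulative_sum_py data out) := by unfold Spec_generate_cumulative_sum_py; infer_instance

-- ===== CLAIM (what is proved, stated in full; the proofs are below) =====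
def Claim_equal_generate_cumulative_sum_py : Prop := ∀ (data : List Int), Dom_generate_cumulative_sum_py data → Spec_generate_cumulative_sum_py data (generate_cumulative_sum_py data)

-- ===== LEMMAS AND PROOFS =====

-- setting an entry of a mapped range is mapping a pointwise-updated function
lemma pv_set_map_range (V k : Nat) (f : Nat → Int) (v : Int) :
    ((List.range V).map f).set k v
      = (List.range V).map (fun i => if i = k then v else f i) := by
  apply List.ext_getElem (by simp)
  intro i h1 h2
  simp only [List.getElem_set, List.getElem_map, List.getElem_range]
  by_cases h : i = k
  · simp [h]
  · simp only [if_neg h]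
    rw [if_neg (by omega)]

-- loop invariant for A's fold, by induction on the remaining range
lemma pv_loop_inv (data : List Int) (k : Nat) (hk : k ≤ data.length) :
    (PySem.List.pyRange (k : Int) (data.length : Int) 1).foldl
      (fun (st : (List Int × List Int) × Int × Int) n =>
        let cl := PySem.List.pySetD st.1.1 n st.2.1
        let cg := PySem.List.pySetD st.1.2 ((data.length : Int) - n - 1) st.2.2
        let tl := st.2.1 + PySem.List.pyGetD data n 0
        let tg := st.2.2 + PySem.List.pyGetD data ((data.length : Int) - n - 1) 0
        ((cl, cg), tl, tg))
      (((List.range data.length).map (fun i => if i < k then (data.take i).sum else 0),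
        (List.range data.length).map (fun i => if data.length - k ≤ i then (data.drop (i + 1)).sum else 0)),
       (data.take k).sum, (data.drop (data.length - k)).sum)
    = (((List.range data.length).map (fun i => (data.take i).sum),
        (List.range data.length).map (fun i => (data.drop (i + 1)).sum)),
       (data.take data.length).sum, (data.drop 0).sum) := by
  induction hd : data.length - k generalizing k with
  | zero =>
    have hkV : k = data.length := by omega
    subst hkV
    rw [PySem.List.pyRange_one_eq_nil le_rfl]
    simp only [List.foldl_nil]
    refine Prod.ext (Prod.ext ?_ ?_) rfl <;> simp only
    · apply List.map_congr_left; intro i hi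
      simp only [List.mem_range] at hi; simp [hi]
    · apply List.map_congr_left; intro i hi; simp
  | succ d ih =>
    have hklt : k < data.length := by omega
    rw [PySem.List.pyRange_one_cons (by exact_mod_cast hklt)]
    rw [← hd]
    simp only [List.foldl_cons]
    have hidx : (data.length : Int) - (k : Int) - 1 = ((data.length - k - 1 : Nat) : Int) := by
      omega
    have hstep :
        (((PySem.List.pySetD
             ((List.range data.length).map (fun i => if i < k then (data.take i).sum else 0))
             ((k : Nat) : Int) (data.take k).sum,
           PySem.List.pySetD
             ((List.range data.length).map (fun i => if data.length - k ≤ i then (data.drop (i + 1)).sum else 0))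
             ((data.length : Int) - (k : Int) - 1) (data.drop (data.length - k)).sum),
          (data.take k).sum + PySem.List.pyGetD data ((k : Nat) : Int) 0,
          (data.drop (data.length - k)).sum + PySem.List.pyGetD data ((data.length : Int) - (k : Int) - 1) 0)
          : (List Int × List Int) × Int × Int)
        = (((List.range data.length).map (fun i => if i < k + 1 then (data.take i).sum else 0),
            (List.range data.length).map (fun i => if data.length - (k + 1) ≤ i then (data.drop (i + 1)).sum else 0)),
           (data.take (k + 1)).sum, (data.drop (data.length - (k + 1))).sum) := by
      have hget : PySem.List.pyGetD data ((k : Nat) : Int) 0 = data[k] := by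
        rw [PySem.List.pyGetD_natCast]; exact List.getD_eq_getElem _ _ hklt
      have hm : data.length - k - 1 < data.length := by omega
      have hget2 : PySem.List.pyGetD data ((data.length : Int) - (k : Int) - 1) 0
          = data[data.length - k - 1] := by
        rw [hidx, PySem.List.pyGetD_natCast]; exact List.getD_eq_getElem _ _ hm
      refine Prod.ext (Prod.ext ?_ ?_) (Prod.ext ?_ ?_) <;> simp only
      · rw [PySem.List.pySetD_natCast, pv_set_map_range]
        apply List.map_congr_left; intro i hi; simp only [List.mem_range] at hi
        by_cases h : i = k
        · simp [h]
        · by_cases h2 : i < k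
          · rw [if_neg h, if_pos h2, if_pos (by omega)]
          · rw [if_neg h, if_neg h2, if_neg (by omega)]
      · rw [hidx, PySem.List.pySetD_natCast, pv_set_map_range]
        apply List.map_congr_left; intro i hi; simp only [List.mem_range] at hi
        by_cases h : i = data.length - k - 1
        · subst h
          rw [if_pos rfl, if_pos (by omega : data.length - (k + 1) ≤ data.length - k - 1)]
          have h1 : data.length - k - 1 + 1 = data.length - k := by omega
          rw [h1]
        · rw [if_neg h]
          by_cases h2 : data.length - k ≤ i
          · rw [if_pos h2, if_pos (by omega)]
          · rw [if_neg h2, if_neg (by omega)]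
      · rw [hget, List.sum_take_succ data k hklt]
      · rw [hget2]
        have hrw : data.length - (k + 1) = data.length - k - 1 := by omega
        rw [hrw, List.drop_eq_getElem_cons hm, List.sum_cons]
        have h1 : data.length - k - 1 + 1 = data.length - k := by omega
        rw [h1]; ring
    rw [hstep]
    have hc : ((k : Int) + 1) = ((k + 1 : Nat) : Int) := by push_cast; ring
    rw [hc]
    have hd2 : data.length - (k + 1) = d := by omega
    rw [hd2]
    exact ih (k + 1) (by omega) (by omega)

-- ===== VERDICT (by name: the statement is the Claim_ definition above) =====
theorem generate_cumulative_sum_py_spec : Claim_equal_generate_cumulative_sum_py := by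
  intro data _
  unfold Spec_generate_cumulative_sum_py generate_cumulative_sum_py generate_cumulative_sum_py_alt
  simp only
  have h0 := pv_loop_inv data 0 (Nat.zero_le _)
  simp only [Nat.cast_zero, Nat.sub_zero, List.take_zero, List.sum_nil, List.drop_length] at h0
  have hinit : ((List.range data.length).map (fun i => if i < 0 then (data.take i).sum else 0))
      = List.replicate data.length (0 : Int) := by
    apply List.ext_getElem (by simp)
    intro i h1 h2; simp
  have hinit2 : ((List.range data.length).map (fun i => if data.length ≤ i then (data.drop (i + 1)).sum else 0))
      = List.replicate data.length (0 : Int) := by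
    apply List.ext_getElem (by simp)
    intro i h1 h2
    simp only [List.getElem_map, List.getElem_range, List.getElem_replicate]
    rw [if_neg (by simp at h1; omega)]
  rw [hinit, hinit2] at h0
  rw [h0]
  rw [PySem.List.pyRange_one]
  simp only [Int.sub_zero, Int.toNat_natCast, List.map_map]
  refine Prod.ext ?_ ?_ <;> simp only
  · apply List.map_congr_left; intro i hi; simp only [List.mem_range] at hi
    simp only [Function.comp]
    rw [Int.zero_add, PySem.List.slice_to_natCast]
  · apply List.map_congr_left; intro i hi; simp only [List.mem_range] at hi
    simp only [Function.comp]
    rw [Int.zero_add]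
    have : ((i : Int) + 1) = ((i + 1 : Nat) : Int) := by push_cast; ring
    rw [this, PySem.List.slice_from_natCast]
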